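-- pv_equiv track=rewrite | github.com/borjasotomayor/advent-of-code | 2025/day03.py | find_max_digit
-- ===== SOURCE A (Python) =====
-- def find_max_digit(bank: str, start: int, end: int) -> tuple[str, int]:
--     """
--     Find the largest digit (and its index) in
--     a substring of the bank (from index 'start'
--     up to, but not including 'end')
--
--     This is basically a slightly more efficient way
--     of calling .max followed by .index
--     """
--     max_digit = ""
--     max_digit_idx = -1
--     for i in range(start, end):
--         if bank[i] > max_digit:
--             max_digit = bank[i]
--             max_digit_idx = i
--
--     return max_digit, max_digit_idx
-- ===== SOURCE B (Python) =====
-- def find_max_digit(bank: str, start: int, end: int) -> tuple[str, int]: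
--     if start >= end:
--         return "", -1
--     m = max(bank[i] for i in range(start, end))
--     for i in range(start, end):
--         if bank[i] == m:
--             return m, i
-- ===== Notes on version B (the rewrite author's own statement) =====
-- stated objective: alternative
-- what changed: Replaces A's single pass that tracks the running maximum and its index with a two-pass decomposition: one pass computes the maximum character with max(), a second pass returns at its first occurrence.
import Mathlib
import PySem

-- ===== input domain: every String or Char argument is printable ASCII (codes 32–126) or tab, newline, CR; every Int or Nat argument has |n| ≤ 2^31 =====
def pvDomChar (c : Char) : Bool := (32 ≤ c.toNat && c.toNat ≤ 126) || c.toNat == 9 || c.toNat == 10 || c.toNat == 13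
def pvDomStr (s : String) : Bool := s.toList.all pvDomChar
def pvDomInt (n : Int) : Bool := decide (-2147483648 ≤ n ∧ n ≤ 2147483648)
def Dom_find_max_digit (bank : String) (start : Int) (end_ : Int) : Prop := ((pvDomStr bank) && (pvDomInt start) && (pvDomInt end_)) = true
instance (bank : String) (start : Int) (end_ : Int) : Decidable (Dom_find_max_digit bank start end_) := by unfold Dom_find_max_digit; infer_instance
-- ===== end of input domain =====

-- B replaces A's single tracking pass by a two-pass decomposition (max, then first occurrence); same cost, proven equal on all non-raising inputs.


-- ===== PORT A =====
-- max_digit is "" or a one-char string throughout A's loop; it is represented as Option Char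
-- (none ↔ ""), and Python's `bank[i] > max_digit` (one-char-vs-at-most-one-char string
-- comparison) is exactly `none → true | some d → d < c`. pyGet? none = IndexError (excluded by Pre_).
-- one loop iteration of A: bank[i] compared against the current (max_digit, max_digit_idx)
def pvStep (bank : String) (st : Option Char × Int) (i : Int) : Option Char × Int :=
  match PySem.Str.pyGet? bank i with
  | some c => if (match st.1 with | none => true | some d => decide (d < c)) then (some c, i) else st
  | none => st

def find_max_digit (bank : String) (start : Int) (end_ : Int) : String × Int :=
  let r := (PySem.List.pyRange start end_ 1).foldl (pvStep bank) ((none : Option Char), (-1 : Int))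
  ((match r.1 with | none => "" | some c => String.singleton c), r.2)

-- ===== PORT B =====
-- second pass of Source B: return at the first index whose character equals the maximum m
def pvFindFirst (bank : String) (m : Char) : List Int → String × Int
  | [] => ("", -1)   -- unreachable under Pre_ (m occurs in the scanned range)
  | i :: rest =>
    if PySem.Str.pyGet? bank i = some m then (String.singleton m, i)
    else pvFindFirst bank m rest

def find_max_digit_alt (bank : String) (start : Int) (end_ : Int) : String × Int :=
  if start ≥ end_ then ("", -1)
  else
    -- m = max(bank[i] for i in range(start, end)) : collect the characters, fold max
    match (PySem.List.pyRange start end_ 1).filterMap (fun i => PySem.Str.pyGet? bank i) with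
    | [] => ("", -1)   -- only reachable when some index raises (excluded by Pre_)
    | c0 :: cs => pvFindFirst bank (cs.foldl max c0) (PySem.List.pyRange start end_ 1)

-- ===== PRECONDITION & SPEC =====
-- Pre_ excludes exactly the inputs where Python A raises IndexError: a non-empty range
-- containing an index below -len(bank) or at/after len(bank).
def Pre_find_max_digit (bank : String) (start : Int) (end_ : Int) : Prop :=
  start < end_ → (-(PySem.Str.len bank : Int) ≤ start ∧ end_ ≤ (PySem.Str.len bank : Int))
instance (bank : String) (start : Int) (end_ : Int) : Decidable (Pre_find_max_digit bank start end_) := by unfold Pre_find_max_digit; infer_instance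

def pvWitness_find_max_digit : String × Int × Int := ("271", 0, 3)

def Spec_find_max_digit (bank : String) (start : Int) (end_ : Int) (out : String × Int) : Prop := out = find_max_digit_alt bank start end_
instance (bank : String) (start : Int) (end_ : Int) (out : String × Int) : Decidable (Spec_find_max_digit bank start end_ out) := by unfold Spec_find_max_digit; infer_instance

-- ===== CLAIM (what is proved, stated in full; the proofs are below) =====
def Claim_equal_find_max_digit : Prop := ∀ (bank : String) (start : Int) (end_ : Int), Dom_find_max_digit bank start end_ → Pre_find_max_digit bank start end_ → Spec_find_max_digit bank start end_ (find_max_digit bank start end_)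

-- ===== LEMMAS AND PROOFS =====

-- the maximum of the characters at the indices of l, seeded with c (proof-only helper)
def pvM (bank : String) (c : Char) (l : List Int) : Char :=
  l.foldl (fun a i =>
    match PySem.Str.pyGet? bank i with
    | some ci => max a ci
    | none => a) c

lemma pvM_cons_some (bank : String) {i : Int} {ci : Char} (c : Char) (t : List Int)
    (h : PySem.Str.pyGet? bank i = some ci) :
    pvM bank c (i :: t) = pvM bank (max c ci) t := by
  simp only [pvM, List.foldl_cons, h]

lemma pvM_cons_none (bank : String) {i : Int} (c : Char) (t : List Int)
    (h : PySem.Str.pyGet? bank i = none) :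
    pvM bank c (i :: t) = pvM bank c t := by
  simp only [pvM, List.foldl_cons, h]

lemma le_pvM (bank : String) : ∀ (l : List Int) (c : Char), c ≤ pvM bank c l := by
  intro l
  induction l with
  | nil => intro c; exact le_refl c
  | cons i t ih =>
    intro c
    cases h : PySem.Str.pyGet? bank i with
    | none => rw [pvM_cons_none bank c t h]; exact ih c
    | some ci => rw [pvM_cons_some bank c t h]; exact le_trans (le_max_left c ci) (ih (max c ci))

lemma pvM_mem (bank : String) : ∀ (l : List Int) (c : Char),
    pvM bank c l = c ∨ ∃ i ∈ l, PySem.Str.pyGet? bank i = some (pvM bank c l) := by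
  intro l
  induction l with
  | nil => intro c; exact Or.inl rfl
  | cons i t ih =>
    intro c
    cases h : PySem.Str.pyGet? bank i with
    | none =>
      rw [pvM_cons_none bank c t h]
      rcases ih c with h1 | ⟨j, hj, hg⟩
      · exact Or.inl h1
      · exact Or.inr ⟨j, List.mem_cons_of_mem _ hj, hg⟩
    | some ci =>
      rw [pvM_cons_some bank c t h]
      rcases ih (max c ci) with h1 | ⟨j, hj, hg⟩
      · rcases max_cases c ci with ⟨he, _⟩ | ⟨he, _⟩
        · exact Or.inl (by rw [h1, he])
        · exact Or.inr ⟨i, List.mem_cons_self .., by rw [h, h1, he]⟩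
      · exact Or.inr ⟨j, List.mem_cons_of_mem _ hj, hg⟩

lemma pvFindFirst_fst (bank : String) (m : Char) : ∀ (l : List Int),
    (∃ i ∈ l, PySem.Str.pyGet? bank i = some m) →
    pvFindFirst bank m l = (String.singleton m, (pvFindFirst bank m l).2) := by
  intro l
  induction l with
  | nil => rintro ⟨i, hi, -⟩; exact absurd hi (List.not_mem_nil)
  | cons i t ih =>
    rintro ⟨j, hj, hg⟩
    simp only [pvFindFirst]
    by_cases h : PySem.Str.pyGet? bank i = some m
    · rw [if_pos h]
    · rw [if_neg h]
      rcases List.mem_cons.mp hj with rfl | hjt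
      · exact absurd hg h
      · exact ih ⟨j, hjt, hg⟩

lemma filterMap_foldl_max (bank : String) : ∀ (l : List Int) (c : Char),
    (∀ i ∈ l, (PySem.Str.pyGet? bank i).isSome) →
    (l.filterMap (fun i => PySem.Str.pyGet? bank i)).foldl max c = pvM bank c l := by
  intro l
  induction l with
  | nil => intro c _; rfl
  | cons i t ih =>
    intro c h
    obtain ⟨ci, hci⟩ := Option.isSome_iff_exists.mp (h i (List.mem_cons_self ..))
    rw [pvM_cons_some bank c t hci]
    simp only [List.filterMap_cons, hci, List.foldl_cons]
    exact ih (max c ci) (fun j hj => h j (List.mem_cons_of_mem _ hj))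

-- the invariant of A's loop: from state (some c, j) the fold returns the running maximum
-- and the first index (within l) of an element strictly above c that attains it
lemma scanA_eq (bank : String) : ∀ (l : List Int) (c : Char) (j : Int),
    (∀ i ∈ l, (PySem.Str.pyGet? bank i).isSome) →
    l.foldl (pvStep bank) ((some c : Option Char), j)
    = (some (pvM bank c l),
       if c < pvM bank c l then (pvFindFirst bank (pvM bank c l) l).2 else j) := by
  intro l
  induction l with
  | nil =>
    intro c j _
    simp [pvM]
  | cons i t ih =>
    intro c j h
    obtain ⟨ci, hci⟩ := Option.isSome_iff_exists.mp (h i (List.mem_cons_self ..))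
    have ht : ∀ i ∈ t, (PySem.Str.pyGet? bank i).isSome :=
      fun j hj => h j (List.mem_cons_of_mem _ hj)
    have hM : pvM bank c (i :: t) = pvM bank (max c ci) t := pvM_cons_some bank c t hci
    simp only [List.foldl_cons, pvStep, hci]
    by_cases hlt : c < ci
    · rw [if_pos (by simpa using hlt)]
      rw [ih ci i ht]
      have hmax : max c ci = ci := max_eq_right (le_of_lt hlt)
      rw [hM, hmax]
      have hle : ci ≤ pvM bank ci t := le_pvM bank t ci
      have hcM : c < pvM bank ci t := lt_of_lt_of_le hlt hle
      rw [if_pos hcM]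
      simp only [pvFindFirst, hci]
      by_cases he : ci = pvM bank ci t
      · rw [← he]; simp
      · rw [if_pos (lt_of_le_of_ne hle he), if_neg (fun hh => he (Option.some.inj hh))]
    · rw [if_neg (by simpa using hlt)]
      rw [ih c j ht]
      have hmax : max c ci = c := max_eq_left (le_of_not_gt hlt)
      rw [hM, hmax]
      by_cases hcM : c < pvM bank c t
      · rw [if_pos hcM, if_pos hcM]
        simp only [pvFindFirst, hci]
        have hne : ci ≠ pvM bank c t := fun he => hlt (by rw [he]; exact hcM)
        rw [if_neg (fun hh => hne (Option.some.inj hh))]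
      · rw [if_neg hcM, if_neg hcM]

lemma mem_range_isSome (bank : String) (start end_ : Int)
    (hpre : Pre_find_max_digit bank start end_) :
    ∀ i ∈ PySem.List.pyRange start end_ 1, (PySem.Str.pyGet? bank i).isSome := by
  intro i hi
  rw [PySem.List.mem_pyRange_one] at hi
  have hlt : start < end_ := lt_of_le_of_lt hi.1 hi.2
  obtain ⟨h1, h2⟩ := hpre hlt
  have hlen : (PySem.Str.len bank : Int) = (bank.toList.length : Int) := by
    simp [PySem.Str.len_eq]
  rw [hlen] at h1 h2
  rw [Option.isSome_iff_ne_none]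
  intro hn
  rw [show PySem.Str.pyGet? bank i = PySem.List.pyGet? bank.toList i by simp,
      PySem.List.pyGet?_eq_none_iff] at hn
  apply hn
  simp only [PySem.Raise.InRange]
  omega

-- ===== VERDICT (by name: the statement is the Claim_ definition above) =====
theorem find_max_digit_spec : Claim_equal_find_max_digit := by
  intro bank start end_ _ hpre
  unfold Spec_find_max_digit
  by_cases hlt : start < end_
  · have hsome := mem_range_isSome bank start end_ hpre
    rw [PySem.List.pyRange_one_cons hlt] at hsome
    obtain ⟨c0, hc0⟩ := Option.isSome_iff_exists.mp (hsome start (List.mem_cons_self ..))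
    have ht : ∀ i ∈ PySem.List.pyRange (start + 1) end_ 1, (PySem.Str.pyGet? bank i).isSome :=
      fun j hj => hsome j (List.mem_cons_of_mem _ hj)
    simp only [find_max_digit, find_max_digit_alt, PySem.List.pyRange_one_cons hlt,
      List.foldl_cons, List.filterMap_cons, hc0]
    rw [if_neg (by omega : ¬ start ≥ end_)]
    have hstep : pvStep bank ((none : Option Char), (-1 : Int)) start = (some c0, start) := by
      simp only [pvStep, hc0]
      exact if_pos trivial
    rw [hstep, scanA_eq bank _ c0 start ht, filterMap_foldl_max bank _ c0 ht]
    set M := pvM bank c0 (PySem.List.pyRange (start + 1) end_ 1) with hMdef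
    simp only [pvFindFirst, hc0]
    by_cases he : c0 = M
    · rw [← he]; simp
    · have hlt0 : c0 < M := lt_of_le_of_ne (le_pvM bank _ c0) he
      rw [if_pos hlt0, if_neg (show ¬ (some c0 = some M) from fun hh => he (Option.some.inj hh))]
      have hex : ∃ i ∈ PySem.List.pyRange (start + 1) end_ 1,
          PySem.Str.pyGet? bank i = some M := by
        rcases pvM_mem bank (PySem.List.pyRange (start + 1) end_ 1) c0 with h1 | h2
        · exact absurd h1.symm he
        · exact h2
      rw [pvFindFirst_fst bank M _ hex]
  · simp [find_max_digit, find_max_digit_alt,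
      PySem.List.pyRange_one_eq_nil (not_lt.mp hlt), not_lt.mp hlt]
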